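-- pv_equiv track=rewrite | github.com/BiocPy/DelayedArray | src/delayedarray/_subset.py | _sanitize_subset
-- ===== SOURCE A (Python) =====
-- def _sanitize_subset(subset):
--     okay = True
--     for i in range(1, len(subset)):
--         if subset[i] <= subset[i - 1]:
--             okay = False
--             break
--
--     if okay:
--         return subset, None
--
--     sortvec = []
--     for i, d in enumerate(subset):
--         sortvec.append((d, i))
--     sortvec.sort()
--
--     san = []
--     remap = [None] * len(sortvec)
--     last = None
--     for d, i in sortvec:
--         if last != d:
--             san.append(d)
--             last = d
--         remap[i] = len(san) - 1
--
--     return san, remap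
-- ===== SOURCE B (Python) =====
-- def _sanitize_subset(subset):
--     for i in range(1, len(subset)):
--         if subset[i] <= subset[i - 1]:
--             break
--     else:
--         return subset, None
--
--     uniq = set(subset)
--     remap = [sum(v < d for v in uniq) for d in subset]
--     san = [0] * len(uniq)
--     for d, r in zip(subset, remap):
--         san[r] = d
--     return san, remap
-- ===== Notes on version B (the rewrite author's own statement) =====
-- stated objective: alternative
-- what changed: B does no sorting at all: each element's remap rank is the count of distinct values smaller than it (a comparison-counting pass over set(subset)), and san is rebuilt by scattering each value into its rank slot, replacing A's sort of (value,index) pairs followed by an interleaved dedupe-and-remap walk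
import Mathlib
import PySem

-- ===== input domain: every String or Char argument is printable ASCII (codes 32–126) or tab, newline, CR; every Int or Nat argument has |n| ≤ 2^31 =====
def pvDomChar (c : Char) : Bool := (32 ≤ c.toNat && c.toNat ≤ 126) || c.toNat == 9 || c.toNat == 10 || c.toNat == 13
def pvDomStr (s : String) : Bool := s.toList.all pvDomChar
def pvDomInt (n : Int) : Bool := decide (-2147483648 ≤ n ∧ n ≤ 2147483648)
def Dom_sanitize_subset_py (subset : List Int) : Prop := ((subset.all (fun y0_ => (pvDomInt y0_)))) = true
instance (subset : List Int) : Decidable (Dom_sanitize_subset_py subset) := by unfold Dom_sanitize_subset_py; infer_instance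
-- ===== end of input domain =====

-- B keeps A's early-return guard but does NO sorting: each element's remap rank is the
-- count of distinct values smaller than it, and san is rebuilt by scattering each value
-- into its rank slot; objective: alternative (replaces A's pair-sort + interleaved
-- dedupe-and-remap walk).

-- ===== PORT A =====
-- the 'for i in range(1, len(subset))' loop with its break
def pvOkayLoopA (subset : List Int) : List Int → Bool
  | [] => true
  | i :: rest =>
      if PySem.List.pyGetD subset i 0 ≤ PySem.List.pyGetD subset (i - 1) 0 then false
      else pvOkayLoopA subset rest

-- one iteration of 'for d, i in sortvec: …' over the state (san, remap, last)
def pvStepA (st : List Int × List (Option Int) × Option Int) (p : Int × Int) :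
    List Int × List (Option Int) × Option Int :=
  match st with
  | (san, remap, last) =>
    if last ≠ some p.1 then
      (san ++ [p.1], PySem.List.pySetD remap p.2 (some (PySem.List.len (san ++ [p.1]) - 1)), some p.1)
    else
      (san, PySem.List.pySetD remap p.2 (some (PySem.List.len san - 1)), last)

def sanitize_subset_py (subset : List Int) : List Int × Option (List Int) :=
  if pvOkayLoopA subset (PySem.List.pyRange 1 (PySem.List.len subset)) then
    (subset, none)
  else
    let sortvec := (PySem.List.enumerate subset).foldl (fun acc p => acc ++ [(p.2, p.1)]) []
    let sv := PySem.List.sorted2 sortvec Prod.fst Prod.snd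
    let st := sv.foldl pvStepA ([], List.replicate subset.length none, none)
    -- every cell of remap has been assigned by the loop, so '.getD 0' only strips 'some' (exact)
    (st.1, some (st.2.1.map (fun o => o.getD 0)))

-- ===== PORT B =====
-- B's guard loop is verbatim A's, so its port shares the helper pvOkayLoopA
def sanitize_subset_py_alt (subset : List Int) : List Int × Option (List Int) :=
  if pvOkayLoopA subset (PySem.List.pyRange 1 (PySem.List.len subset)) then
    (subset, none)
  else
    let uniq := PySem.Set.ofList subset
    -- 'sum(v < d for v in uniq)': a 0/1 sum over the set, order-independent (exact)
    let remap := subset.map (fun d => (uniq.map (fun v => if v < d then (1 : Int) else 0)).sum)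
    -- 'san = [0]*len(uniq); for d, r in zip(subset, remap): san[r] = d'
    let san := (subset.zip remap).foldl (fun s p => PySem.List.pySetD s p.2 p.1)
      (List.replicate uniq.length (0 : Int))
    (san, some remap)

-- ===== PRECONDITION & SPEC =====
def Spec_sanitize_subset_py (subset : List Int) (out : List Int × Option (List Int)) : Prop := out = sanitize_subset_py_alt subset
instance (subset : List Int) (out : List Int × Option (List Int)) : Decidable (Spec_sanitize_subset_py subset out) := by unfold Spec_sanitize_subset_py; infer_instance

-- ===== CLAIM (what is proved, stated in full; the proofs are below) =====
def Claim_equal_sanitize_subset_py : Prop := ∀ (subset : List Int), Dom_sanitize_subset_py subset → Spec_sanitize_subset_py subset (sanitize_subset_py subset)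

-- ===== LEMMAS AND PROOFS =====

-- Python's tuple order on the distinct (value, index) pairs
def pvLex (a b : Int × Int) : Prop := a.1 < b.1 ∨ (a.1 = b.1 ∧ a.2 < b.2)

def pvBefore (a b : Int × Int) : Bool :=
  decide (a.1 < b.1) || (!decide (b.1 < a.1) && decide (a.2 < b.2))

lemma pvBefore_iff (a b : Int × Int) : pvBefore a b = true ↔ pvLex a b := by
  simp [pvBefore, pvLex]; omega
lemma pvLex_total {a b : Int × Int} (h : a ≠ b) : pvLex a b ∨ pvLex b a := by
  rcases a with ⟨a1, a2⟩; rcases b with ⟨b1, b2⟩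
  simp [pvLex]
  by_cases h12 : a1 = b1
  · subst h12
    have : a2 ≠ b2 := by simpa using h
    omega
  · omega
lemma pvLex_trans {a b c : Int × Int} (h1 : pvLex a b) (h2 : pvLex b c) : pvLex a c := by
  rcases a with ⟨a1, a2⟩; rcases b with ⟨b1, b2⟩; rcases c with ⟨c1, c2⟩
  simp [pvLex] at *; omega

lemma pvInsertBy_pairwise (x : Int × Int) (ys : List (Int × Int))
    (hp : ys.Pairwise pvLex) (hne : ∀ y ∈ ys, y ≠ x) :
    (PySem.List.insertBy pvBefore x ys).Pairwise pvLex := by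
  induction ys with
  | nil => simp [PySem.List.insertBy]
  | cons y ys ih =>
    rw [show PySem.List.insertBy pvBefore x (y :: ys) =
        if pvBefore x y then x :: y :: ys else y :: PySem.List.insertBy pvBefore x ys from by
      simp [PySem.List.insertBy]]
    rcases List.pairwise_cons.mp hp with ⟨hy, hys⟩
    by_cases hb : pvBefore x y = true
    · simp only [hb, if_pos]
      refine List.pairwise_cons.mpr ⟨?_, hp⟩
      intro z hz
      rcases List.mem_cons.mp hz with rfl | hz
      · exact (pvBefore_iff _ _).mp hb
      · exact pvLex_trans ((pvBefore_iff _ _).mp hb) (hy z hz)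
    · simp only [hb, if_neg, Bool.false_eq_true, not_false_iff]
      refine List.pairwise_cons.mpr ⟨?_, ih hys (fun z hz => hne z (List.mem_cons_of_mem _ hz))⟩
      intro z hz
      rcases (PySem.List.insertBy_mem_iff _ _ _ _).mp hz with rfl | hz
      · rcases pvLex_total (show y ≠ z from hne y List.mem_cons_self) with h | h
        · exact h
        · exact absurd ((pvBefore_iff z y).mpr h) (by simpa using hb)
      · exact hy z hz

lemma pvFoldlInsert_pairwise (xs : List (Int × Int)) : ∀ (acc : List (Int × Int)),
    acc.Pairwise pvLex → xs.Nodup →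
    (∀ a ∈ acc, ∀ b ∈ xs, a ≠ b) →
    (xs.foldl (fun acc x => PySem.List.insertBy pvBefore x acc) acc).Pairwise pvLex := by
  induction xs with
  | nil => intro acc hacc _ _; simpa using hacc
  | cons x xs ih =>
    intro acc hacc hnd hdisj
    simp only [List.foldl_cons]
    refine ih _ (pvInsertBy_pairwise x acc hacc
      (fun y hy => hdisj y hy x List.mem_cons_self)) (List.Nodup.of_cons hnd) ?_
    intro a ha b hb
    rcases (PySem.List.insertBy_mem_iff _ _ _ _).mp ha with rfl | ha
    · exact fun he => (List.nodup_cons.mp hnd).1 (he ▸ hb)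
    · exact hdisj a ha b (List.mem_cons_of_mem _ hb)

lemma pvSorted2_pairwise (xs : List (Int × Int)) (hnd : xs.Nodup) :
    (PySem.List.sorted2 xs Prod.fst Prod.snd).Pairwise pvLex := by
  have he : PySem.List.sorted2 xs Prod.fst Prod.snd =
      xs.foldl (fun acc x => PySem.List.insertBy pvBefore x acc) [] := rfl
  rw [he]
  exact pvFoldlInsert_pairwise xs [] (by simp) hnd (by simp)

lemma pvMem_le_getLast (san : List Int) : san.Pairwise (· < ·) → (h : san ≠ []) →
    ∀ x ∈ san, x ≤ san.getLast h := by
  induction san with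
  | nil => intro _ h; exact absurd rfl h
  | cons y t ih =>
    intro hp h x hx
    match t, hx with
    | [], hx => simp at hx; simp [hx]
    | z :: t, hx =>
      rw [List.getLast_cons (by simp)]
      rcases List.mem_cons.mp hx with rfl | hx
      · have h1 : x < z := (List.pairwise_cons.mp hp).1 z List.mem_cons_self
        have := ih (List.pairwise_cons.mp hp).2 (by simp) z List.mem_cons_self
        omega
      · exact ih (List.pairwise_cons.mp hp).2 (by simp) x hx

-- idxOf of the last element of a nodup prefix, inside any extension
lemma pvIdxOf_getLast (san ext : List Int) (hnd : san.Nodup) (h : san ≠ []) :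
    List.idxOf (san.getLast h) (san ++ ext) = san.length - 1 := by
  obtain ⟨g, hg⟩ : ∃ g, san.getLast h = g := ⟨_, rfl⟩
  rw [hg]
  have he : san.dropLast ++ [g] = san := by rw [← hg]; exact List.dropLast_append_getLast h
  have hmem : g ∈ san := hg ▸ List.getLast_mem h
  rw [List.idxOf_append, if_pos hmem]
  have hnm : g ∉ san.dropLast := by
    intro hm
    have := (List.nodup_append.mp (by rw [he]; exact hnd)).2.2
    exact this g hm g (by simp) rfl
  conv_lhs => rw [← he]
  rw [List.idxOf_append, if_neg hnm, List.idxOf_cons_self]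
  rw [← he]
  simp

lemma pvIdxOf_notmem (san ext : List Int) (d : Int) (hnm : d ∉ san) :
    List.idxOf d (san ++ d :: ext) = san.length := by
  rw [List.idxOf_append, if_neg hnm, List.idxOf_cons_self]
  simp

lemma pvLoopInv (rest : List (Int × Int)) :
    ∀ (san : List Int) (remap : List (Option Int)) (last : Option Int),
    last = san.getLast? →
    rest.Pairwise pvLex →
    (∀ p ∈ rest, 0 ≤ p.2 ∧ p.2 < (remap.length : Int)) →
    (rest.map Prod.snd).Nodup →
    san.Pairwise (· < ·) →
    (∀ x ∈ san, ∀ p ∈ rest, x ≤ p.1) →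
    (san <+: (rest.foldl pvStepA (san, remap, last)).1) ∧
    (rest.foldl pvStepA (san, remap, last)).1.Pairwise (· < ·) ∧
    (∀ x, x ∈ (rest.foldl pvStepA (san, remap, last)).1 ↔ x ∈ san ∨ x ∈ rest.map Prod.fst) ∧
    (rest.foldl pvStepA (san, remap, last)).2.1.length = remap.length ∧
    (∀ p ∈ rest, (rest.foldl pvStepA (san, remap, last)).2.1[p.2.toNat]? =
        some (some ((List.idxOf p.1 (rest.foldl pvStepA (san, remap, last)).1 : Int)))) ∧
    (∀ j : Nat, (∀ p ∈ rest, p.2 ≠ (j : Int)) →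
        (rest.foldl pvStepA (san, remap, last)).2.1[j]? = remap[j]?) := by
  induction rest with
  | nil =>
    intro san remap last hlast hlex hb hnd hsan hle
    simp [hsan]
  | cons p rest ih =>
    intro san remap last hlast hlex hb hnd hsan hle
    have hsannd : san.Nodup := hsan.imp (fun {a b} h => ne_of_lt h)
    have hp2 := hb p List.mem_cons_self
    have hlexrest := (List.pairwise_cons.mp hlex).2
    have hlexhead := (List.pairwise_cons.mp hlex).1
    have hndrest : (rest.map Prod.snd).Nodup := by simp at hnd; exact hnd.2
    have hsndne : ∀ q ∈ rest, q.2 ≠ p.2 := by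
      simp only [List.map_cons, List.nodup_cons] at hnd
      intro q hq he
      exact hnd.1 (he ▸ List.mem_map_of_mem hq)
    by_cases hc : san.getLast? = some p.1
    · -- value already last in san: no append
      have hcond : ¬ (last ≠ some p.1) := by rw [hlast, hc]; simp
      have hmem : p.1 ∈ san := by
        rcases san with _ | ⟨y, t⟩
        · simp at hc
        · have := List.getLast?_eq_some_getLast (l := y :: t) (by simp)
          rw [this] at hc
          have : (y :: t).getLast (by simp) = p.1 := by simpa using hc
          exact this ▸ List.getLast_mem (by simp)
      simp only [List.foldl_cons, pvStepA, if_neg hcond]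
      have hIH := ih san (PySem.List.pySetD remap p.2 (some (PySem.List.len san - 1))) last hlast
        hlexrest
        (by intro q hq; rw [PySem.List.length_pySetD]; exact hb q (List.mem_cons_of_mem _ hq))
        hndrest hsan
        (by intro x hx q hq; exact hle x hx q (List.mem_cons_of_mem _ hq))
      obtain ⟨C1, C2, C3, C4, C5, C6⟩ := hIH
      set F := List.foldl pvStepA (san, PySem.List.pySetD remap p.2 (some (PySem.List.len san - 1)), last) rest with hF
      refine ⟨C1, C2, ?_, ?_, ?_, ?_⟩
      · intro x
        rw [C3 x]
        simp only [List.map_cons, List.mem_cons]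
        constructor
        · rintro (hx | hx) <;> tauto
        · rintro (hx | hx | hx)
          · tauto
          · left; exact hx ▸ hmem
          · tauto
      · rw [C4, PySem.List.length_pySetD]
      · intro q hq
        rcases List.mem_cons.mp hq with rfl | hq
        · -- q = p
          rw [C6 _ (by intro r hr; have := hsndne r hr; omega)]
          rw [PySem.List.pySetD_of_nonneg _ _ hp2.1]
          rw [List.getElem?_set_self (by omega)]
          obtain ⟨ext, hext⟩ := C1
          have hne : san ≠ [] := by rintro rfl; simp at hc
          have hgl : san.getLast hne = q.1 := by
            have := List.getLast?_eq_some_getLast hne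
            rw [this] at hc; simpa using hc
          rw [← hext, ← hgl, pvIdxOf_getLast san ext hsannd hne]
          have hlen : san.length ≠ 0 := by simpa using hne
          rw [PySem.List.len_eq]
          congr 2
          omega
        · exact C5 q hq
      · intro j hj
        rw [C6 j (fun r hr => hj r (List.mem_cons_of_mem _ hr))]
        rw [PySem.List.pySetD_of_nonneg _ _ hp2.1]
        rw [List.getElem?_set_ne (by have := hj p List.mem_cons_self; omega)]
    · -- new value: append to san
      have hcond : last ≠ some p.1 := by rw [hlast]; exact hc
      have hnotmem : p.1 ∉ san := by
        intro hm
        have hne : san ≠ [] := by rintro rfl; simp at hm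
        have h1 : p.1 ≤ san.getLast hne := pvMem_le_getLast san hsan hne p.1 hm
        have h2 : san.getLast hne ≤ p.1 := hle _ (List.getLast_mem hne) p List.mem_cons_self
        have : san.getLast hne = p.1 := le_antisymm h2 h1
        exact hc (this ▸ List.getLast?_eq_some_getLast hne)
      have hlt : ∀ x ∈ san, x < p.1 := by
        intro x hx
        have h1 : x ≤ p.1 := hle x hx p List.mem_cons_self
        have h2 : x ≠ p.1 := fun he => hnotmem (he ▸ hx)
        omega
      have hsan' : (san ++ [p.1]).Pairwise (· < ·) := by
        rw [List.pairwise_append]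
        exact ⟨hsan, by simp, by intro a ha b hb; simp at hb; exact hb ▸ hlt a ha⟩
      simp only [List.foldl_cons, pvStepA, if_pos hcond]
      have hIH := ih (san ++ [p.1])
        (PySem.List.pySetD remap p.2 (some (PySem.List.len (san ++ [p.1]) - 1))) (some p.1)
        (by rw [List.getLast?_concat])
        hlexrest
        (by intro q hq; rw [PySem.List.length_pySetD]; exact hb q (List.mem_cons_of_mem _ hq))
        hndrest hsan'
        (by
          intro x hx q hq
          rcases List.mem_append.mp hx with hx | hx
          · exact hle x hx q (List.mem_cons_of_mem _ hq)
          · have hx : x = p.1 := by simpa using hx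
            have := hlexhead q hq
            rcases this with h | h
            · omega
            · subst hx; omega)
      obtain ⟨C1, C2, C3, C4, C5, C6⟩ := hIH
      refine ⟨((List.prefix_append san [p.1]).trans C1), C2, ?_, ?_, ?_, ?_⟩
      · intro x
        rw [C3 x]
        simp only [List.mem_append, List.map_cons, List.mem_cons]
        tauto
      · rw [C4, PySem.List.length_pySetD]
      · intro q hq
        rcases List.mem_cons.mp hq with rfl | hq
        · obtain ⟨ext, hext⟩ := C1
          rw [C6 _ (by intro r hr; have := hsndne r hr; omega)]
          rw [← hext, List.append_assoc, List.singleton_append, pvIdxOf_notmem san ext q.1 hnotmem]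
          rw [PySem.List.pySetD_of_nonneg _ _ hp2.1]
          rw [List.getElem?_set_self (by omega)]
          rw [PySem.List.len_eq]
          congr 2
          simp
        · exact C5 q hq
      · intro j hj
        rw [C6 j (fun r hr => hj r (List.mem_cons_of_mem _ hr))]
        rw [PySem.List.pySetD_of_nonneg _ _ hp2.1]
        rw [List.getElem?_set_ne (by have := hj p List.mem_cons_self; omega)]

-- rank = number of distinct smaller values, on a strictly increasing list
lemma pvIdxOf_eq_countP (L : List Int) (hL : L.Pairwise (· < ·)) (d : Int) (hd : d ∈ L) :
    (L.idxOf d : Int) = ((L.countP (fun v => decide (v < d))) : Int) := by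
  induction L with
  | nil => simp at hd
  | cons x t ih =>
    rcases List.pairwise_cons.mp hL with ⟨hx, ht⟩
    by_cases he : x = d
    · subst he
      rw [List.idxOf_cons_self]
      rw [List.countP_cons]
      simp only [decide_eq_true_eq, lt_irrefl, if_false]
      rw [List.countP_eq_zero.mpr (by intro v hv; simp only [decide_eq_true_eq]; have := hx v hv; simp; omega)]
    · have hdt : d ∈ t := by rcases List.mem_cons.mp hd with rfl | h; exact absurd rfl he; exact h
      rw [List.idxOf_cons_ne _ (by exact he), List.countP_cons]
      have hxd : x < d := hx d hdt
      simp only [decide_eq_true_eq, hxd, if_true]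
      have := ih ht hdt
      push_cast at this ⊢
      omega

-- B's scatter loop, cell by cell: a written cell holds L's value, an untouched one the initial value
lemma pvScatter_get (L : List Int) (P : List (Int × Int))
    (hP : ∀ p ∈ P, ∃ k : Nat, p.2 = (k : Int) ∧ L[k]? = some p.1) :
    ∀ (s : List Int), s.length = L.length → ∀ k : Nat,
      (P.foldl (fun s p => PySem.List.pySetD s p.2 p.1) s)[k]? =
        if ∃ p ∈ P, p.2 = (k : Int) then L[k]? else s[k]? := by
  induction P with
  | nil => intro s _ k; simp
  | cons p P ih =>
    intro s hs k
    obtain ⟨kp, hkp, hLkp⟩ := hP p List.mem_cons_self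
    simp only [List.foldl_cons]
    have hset : PySem.List.pySetD s p.2 p.1 = s.set p.2.toNat p.1 :=
      PySem.List.pySetD_of_nonneg s p.1 (by rw [hkp]; positivity)
    have hlen : (PySem.List.pySetD s p.2 p.1).length = L.length := by
      rw [hset, List.length_set, hs]
    rw [ih (fun q hq => hP q (List.mem_cons_of_mem _ hq)) _ hlen k]
    by_cases hrest : ∃ q ∈ P, q.2 = (k : Int)
    · rw [if_pos hrest, if_pos ⟨_, List.mem_cons_of_mem _ hrest.choose_spec.1, hrest.choose_spec.2⟩]
    · rw [if_neg hrest]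
      by_cases hpk : p.2 = (k : Int)
      · rw [if_pos ⟨p, List.mem_cons_self, hpk⟩]
        have hkk : kp = k := by rw [hkp] at hpk; exact_mod_cast hpk
        subst hkk
        have hklt : kp < L.length := by
          by_contra h
          rw [List.getElem?_eq_none (by omega)] at hLkp
          simp at hLkp
        rw [hset, hkp]
        rw [Int.toNat_natCast]
        rw [List.getElem?_set_self (by omega), hLkp]
      · rw [if_neg (by rintro ⟨q, hq, hq2⟩; rcases List.mem_cons.mp hq with rfl | hq'; exact hpk hq2; exact hrest ⟨q, hq', hq2⟩)]
        rw [hset]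
        rw [List.getElem?_set_ne (by intro h; apply hpk; rw [hkp]; rw [hkp] at h; simp at h; omega)]

-- ===== VERDICT (by name: the statement is the Claim_ definition above) =====
theorem sanitize_subset_py_spec : Claim_equal_sanitize_subset_py := by
  intro subset _
  unfold Spec_sanitize_subset_py
  simp only [sanitize_subset_py, sanitize_subset_py_alt]
  by_cases hg : pvOkayLoopA subset (PySem.List.pyRange 1 (PySem.List.len subset)) = true
  · simp only [hg, if_pos]
  · simp only [Bool.not_eq_true] at hg
    simp only [hg, Bool.false_eq_true, if_false]
    have hsveq : (PySem.List.enumerate subset).foldl (fun acc p => acc ++ [(p.2, p.1)]) ([] : List (Int × Int)) =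
        (PySem.List.enumerate subset).map (fun p : Int × Int => (p.2, p.1)) := by
      simpa using PySem.List.foldl_append_singleton_eq_map (fun p : Int × Int => (p.2, p.1)) (PySem.List.enumerate subset) []
    rw [hsveq]
    set n := subset.length with hn
    set sortvec := (PySem.List.enumerate subset).map (fun p : Int × Int => (p.2, p.1)) with hsvec
    set sv := PySem.List.sorted2 sortvec Prod.fst Prod.snd with hsv
    have hrange : PySem.List.pyRange 0 (PySem.List.len subset) = (List.range n).map (fun k : Nat => (k : Int)) := by
      rw [PySem.List.len_eq]; exact PySem.List.pyRange_zero_natCast n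
    have hsort2 : sortvec = (List.range n).map (fun k : Nat => (PySem.List.pyGetD subset (k : Int) 0, (k : Int))) := by
      rw [hsvec, PySem.List.enumerate_eq_map_pyRange subset 0, hrange]
      simp [List.map_map, Function.comp_def]
    have hndsv : sortvec.Nodup := by
      rw [hsort2]
      refine List.Nodup.map ?_ List.nodup_range
      intro a b hab
      have := congrArg Prod.snd hab
      simpa using this
    have hperm : sv.Perm sortvec := PySem.List.sorted2_perm sortvec Prod.fst Prod.snd false
    have hlexsv : sv.Pairwise pvLex := pvSorted2_pairwise sortvec hndsv
    have hmem_sv : ∀ p : Int × Int, p ∈ sv ↔ ∃ k : Nat, k < n ∧ p = (PySem.List.pyGetD subset (k : Int) 0, (k : Int)) := by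
      intro p
      rw [hperm.mem_iff, hsort2]
      simp [eq_comm]
    have hbounds : ∀ p ∈ sv, 0 ≤ p.2 ∧ p.2 < ((List.replicate n (none : Option Int)).length : Int) := by
      intro p hp
      obtain ⟨k, hk, rfl⟩ := (hmem_sv p).mp hp
      simp only [List.length_replicate]
      constructor <;> [positivity; exact_mod_cast hk]
    have hsndnd : (sv.map Prod.snd).Nodup := by
      rw [(hperm.map Prod.snd).nodup_iff]
      rw [hsort2, List.map_map]
      refine List.Nodup.map ?_ List.nodup_range
      intro a b hab
      simpa using hab
    obtain ⟨C1, C2, C3, C4, C5, C6⟩ :=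
      pvLoopInv sv [] (List.replicate n (none : Option Int)) none rfl hlexsv hbounds hsndnd (by simp) (by simp)
    set F := sv.foldl pvStepA ([], List.replicate n (none : Option Int), none) with hF
    have hfst : sortvec.map Prod.fst = subset := by
      rw [hsort2, List.map_map]
      have h0 := PySem.List.map_pyGetD_pyRange_zero subset 0
      rw [hrange, List.map_map] at h0
      simpa [Function.comp_def] using h0
    have hmemF : ∀ x, x ∈ F.1 ↔ x ∈ subset := by
      intro x
      rw [C3 x]
      simp only [List.not_mem_nil, false_or]
      rw [(hperm.map Prod.fst).mem_iff, hfst]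
    have hndF : F.1.Nodup := C2.imp (fun h => ne_of_lt h)
    have hlenF : F.2.1.length = n := by rw [C4, List.length_replicate]
    -- the set of distinct values, as B builds it, is a permutation of A's san F.1
    have huperm : (PySem.Set.ofList subset).Perm F.1 :=
      (List.perm_ext_iff_of_nodup (PySem.Set.nodup_ofList subset) hndF).mpr
        (fun a => by rw [PySem.Set.mem_ofList, hmemF a])
    have hulen : (PySem.Set.ofList subset).length = F.1.length := huperm.length_eq
    -- B's remap entry for d is the index of d in F.1
    have hremapB : subset.map (fun d => ((PySem.Set.ofList subset).map (fun v => if v < d then (1 : Int) else 0)).sum)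
        = subset.map (fun d => ((List.idxOf d F.1 : Nat) : Int)) := by
      apply List.map_congr_left
      intro d hd
      have h1 : ((PySem.Set.ofList subset).map (fun v => if v < d then (1 : Int) else 0)).sum
          = (((PySem.Set.ofList subset).countP (fun v => decide (v < d))) : Int) := by
        simpa using PySem.List.sum_map_ite_one_zero (fun v => decide (v < d)) (PySem.Set.ofList subset)
      rw [h1, huperm.countP_eq]
      exact (pvIdxOf_eq_countP F.1 C2 d ((hmemF d).mpr hd)).symm
    rw [hremapB]
    -- the zip of subset with its ranks is a map over subset
    have hzip : subset.zip (subset.map (fun d => ((List.idxOf d F.1 : Nat) : Int)))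
        = subset.map (fun d => (d, ((List.idxOf d F.1 : Nat) : Int))) :=
      List.map_prod_left_eq_zip.symm
    rw [hzip]
    have hP : ∀ p ∈ subset.map (fun d => (d, ((List.idxOf d F.1 : Nat) : Int))),
        ∃ k : Nat, p.2 = (k : Int) ∧ F.1[k]? = some p.1 := by
      intro p hp
      obtain ⟨d, hd, rfl⟩ := List.mem_map.mp hp
      refine ⟨List.idxOf d F.1, rfl, ?_⟩
      have hk := List.idxOf_lt_length_of_mem ((hmemF d).mpr hd)
      rw [List.getElem?_eq_getElem hk, List.getElem_idxOf hk]
    have hsc := pvScatter_get F.1 _ hP (List.replicate (PySem.Set.ofList subset).length (0 : Int))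
      (by rw [List.length_replicate, hulen])
    refine Prod.ext ?_ ?_
    · -- A's san = B's scattered san
      simp only
      apply List.ext_getElem?
      intro k
      rw [hsc k]
      by_cases hk : k < F.1.length
      · rw [if_pos ⟨(F.1[k], ((List.idxOf F.1[k] F.1 : Nat) : Int)),
          List.mem_map_of_mem ((hmemF F.1[k]).mp (List.getElem_mem hk)),
          by rw [List.Nodup.idxOf_getElem hndF k hk]⟩]
      · rw [if_neg ?_, List.getElem?_eq_none (by omega),
          List.getElem?_eq_none (by rw [List.length_replicate, hulen]; omega)]
        rintro ⟨p, hp, hpk⟩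
        obtain ⟨d, hd, rfl⟩ := List.mem_map.mp hp
        have hlt := List.idxOf_lt_length_of_mem ((hmemF d).mpr hd)
        simp only [Int.natCast_inj] at hpk
        omega
    · -- remap lists agree entrywise
      simp only [Option.some.injEq]
      apply List.ext_getElem?
      intro j
      rw [List.getElem?_map, List.getElem?_map]
      by_cases hj : j < n
      · have hpair : (PySem.List.pyGetD subset (j : Int) 0, (j : Int)) ∈ sv :=
          (hmem_sv _).mpr ⟨j, hj, rfl⟩
        have h5 := C5 _ hpair
        rw [show ((j : Int)).toNat = j from by omega] at h5
        rw [h5]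
        have hsubj : subset[j]? = some subset[j] := List.getElem?_eq_getElem hj
        rw [hsubj]
        simp only [Option.map_some, Option.getD_some]
        have hgd : PySem.List.pyGetD subset (j : Int) 0 = subset[j] :=
          PySem.List.pyGetD_eq_getElem subset 0 (by positivity) (by exact_mod_cast hj)
        rw [hgd]
      · have h1 : F.2.1[j]? = none := List.getElem?_eq_none (by omega)
        have h2 : subset[j]? = none := List.getElem?_eq_none (by omega)
        rw [h1, h2]
        rfl
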